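-- pv_equiv track=rewrite | github.com/hmsnell/nsfgrfp-deeplearning-2024 | code/preprocessing.py | string_to_freq
-- ===== SOURCE A (Python) =====
-- import string
--
-- def process_string(text):
--   """
--   Converts a string to lowercase and splits it into a list of words.
--
--   Args:
--     text: The input string.
--
--   Returns:
--     A list of words in lowercase.
--   """
--
--   # Convert the string to lowercase
--   lowercase_text = text.lower()
--
--   # Split the string into a list of words on spaces
--   word_list = lowercase_text.split()
--
--   # Return the list of words
--   return word_list
--
-- def word_frequency(word_list):
--   """
--   Calculates the frequency of each unique word in a list.
--
--   Args:
--     word_list: A list of words.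
--
--   Returns:
--     A dictionary where keys are unique words and values are their frequencies.
--   """
--
--   # Initialize an empty dictionary to store word frequencies
--   frequency_dict = {}
--
--   # Iterate through the word list
--   for word in word_list:
--     # If the word is already in the dictionary, increment its count
--     if word in frequency_dict:
--       frequency_dict[word] += 1
--
--     else:
--       frequency_dict[word] = 1
--
--   return frequency_dict
--
-- def strip_punct(text):
--     letters = set(string.ascii_letters + " ")
--     words = text.split()
--     filtered_words = [word for word in words if all(char in letters for char in word)]
--     return " ".join(filtered_words)
--
-- def string_to_freq(text):
--     letters = set(string.ascii_letters)
--     text = strip_punct(text)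
--     word_list = process_string(text)
--     word_list = remove_single_char_elements(word_list)
--     freq = word_frequency(word_list)
--
--     freq = {key: value for key, value in freq.items() if all(char in letters for char in key)}
--
--
--     vocab = list(freq.keys())
--     vocab_size = len(freq.keys())
--     indices = list(enumerate(vocab))
--     vocabulary = {}
--     for index,word in indices:
--        vocabulary[word] = index
--
--
--     return vocab, vocab_size, indices, freq, word_list, vocabulary
--
-- def remove_single_char_elements(word_list):
--   """
--   Removes elements from a list where the element is a single character,
--   except for the characters "a" and "i".
--
--   Args:
--     word_list: The list to modify.
--
--   Returns:
--     The modified list.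
--   """
--
--   # Use list comprehension to create a new list with filtered elements
--   filtered_list = [word for word in word_list if not (len(word) == 1 and word not in ("a", "i"))]
--
--   # Return the filtered list
--   return filtered_list
-- ===== SOURCE B (Python) =====
-- import string
--
-- def string_to_freq(text):
--     letters = set(string.ascii_letters)
--     word_list = []
--     freq = {}
--     # single pass: filter punctuation-bearing words, lowercase, drop 1-char words
--     # (except "a"/"i"), and count frequencies, all in one loop
--     for word in text.split():
--         if all(c in letters for c in word):
--             w = word.lower()
--             if len(w) != 1 or w in ("a", "i"):
--                 word_list.append(w)
--                 freq[w] = freq.get(w, 0) + 1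
--     vocab = list(freq)
--     vocab_size = len(freq)
--     indices = list(enumerate(vocab))
--     vocabulary = {word: index for index, word in indices}
--     return vocab, vocab_size, indices, freq, word_list, vocabulary
-- ===== Notes on version B (the rewrite author's own statement) =====
-- stated objective: simpler
-- what changed: A strips punctuation-bearing words, joins the survivors back into a string, lowercases and re-splits it, filters single-char words, counts frequencies in a separate pass and then letter-filters and rebuilds the dict; B lowercases each word of one text.split() and does the letter filter, single-char filter, word-list build and frequency count in a single loop, dropping A's no-op second letter filter.
import Mathlib
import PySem

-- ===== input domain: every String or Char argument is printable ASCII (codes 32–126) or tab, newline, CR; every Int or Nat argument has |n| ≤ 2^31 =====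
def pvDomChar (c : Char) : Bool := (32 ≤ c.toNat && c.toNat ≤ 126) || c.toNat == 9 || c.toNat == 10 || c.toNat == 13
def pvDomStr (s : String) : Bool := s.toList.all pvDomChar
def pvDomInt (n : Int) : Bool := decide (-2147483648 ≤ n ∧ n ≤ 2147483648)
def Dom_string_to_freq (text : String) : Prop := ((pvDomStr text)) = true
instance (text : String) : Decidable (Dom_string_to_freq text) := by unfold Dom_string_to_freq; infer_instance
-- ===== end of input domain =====

-- B fuses A's strip-punctuation / lowercase-resplit / single-char-filter / count passes into one
-- loop over text.split(); same return value, single-pass decomposition.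

-- string.ascii_letters
def pvAsciiLetters : List Char :=
  "abcdefghijklmnopqrstuvwxyzABCDEFGHIJKLMNOPQRSTUVWXYZ".toList

-- ===== PORT A =====
def strip_punct (text : String) : String :=
  let letters : PySem.Set Char := PySem.Set.ofList (pvAsciiLetters ++ [' '])
  let words := PySem.Str.split₀ text
  let filtered_words := words.filter (fun w => w.toList.all (fun c => PySem.Set.contains letters c))
  PySem.Str.join " " filtered_words

def process_string (text : String) : List String :=
  PySem.Str.split₀ (PySem.Str.lower text)

def remove_single_char_elements (word_list : List String) : List String :=
  word_list.filter (fun w => !(PySem.Str.len w == 1 && !(w == "a" || w == "i")))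

def word_frequency (word_list : List String) : PySem.Dict String Int :=
  word_list.foldl
    (fun d w => if d.contains w then d.insert w (d.getD w 0 + 1) else d.insert w 1)
    PySem.Dict.empty

def string_to_freq (text : String) : List String × Int × (List (Int × String)) × (List (String × Int)) × List String × (List (String × Int)) :=
  let letters : PySem.Set Char := PySem.Set.ofList pvAsciiLetters
  let text1 := strip_punct text
  let word_list0 := process_string text1
  let word_list := remove_single_char_elements word_list0
  let freq0 := word_frequency word_list
  let freq := (freq0.items.filter (fun p => p.1.toList.all (fun c => PySem.Set.contains letters c))).foldl
      (fun d p => d.insert p.1 p.2) PySem.Dict.empty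
  let vocab := freq.keys
  let vocab_size : Int := freq.keys.length
  let indices := PySem.List.enumerate vocab
  let vocabulary := indices.foldl (fun d p => d.insert p.2 p.1) PySem.Dict.empty
  (vocab, vocab_size, indices, freq.items, word_list, vocabulary.items)

-- ===== PORT B =====
-- the body of B's single loop
def pvStepB (letters : PySem.Set Char) (s : List String × PySem.Dict String Int) (word : String) :
    List String × PySem.Dict String Int :=
  if word.toList.all (fun c => PySem.Set.contains letters c) then
    let w := PySem.Str.lower word
    if PySem.Str.len w != 1 || (w == "a" || w == "i") then
      (s.1 ++ [w], s.2.insert w (s.2.getD w 0 + 1))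
    else s
  else s

def string_to_freq_alt (text : String) : List String × Int × (List (Int × String)) × (List (String × Int)) × List String × (List (String × Int)) :=
  let letters : PySem.Set Char := PySem.Set.ofList pvAsciiLetters
  let st := (PySem.Str.split₀ text).foldl (pvStepB letters) ([], PySem.Dict.empty)
  let word_list := st.1
  let freq := st.2
  let vocab := freq.keys
  let vocab_size : Int := freq.size
  let indices := PySem.List.enumerate vocab
  let vocabulary := indices.foldl (fun d p => d.insert p.2 p.1) PySem.Dict.empty
  (vocab, vocab_size, indices, freq.items, word_list, vocabulary.items)

-- ===== PRECONDITION & SPEC =====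
def Spec_string_to_freq (text : String) (out : List String × Int × (List (Int × String)) × (List (String × Int)) × List String × (List (String × Int))) : Prop := out = string_to_freq_alt text
instance (text : String) (out : List String × Int × (List (Int × String)) × (List (String × Int)) × List String × (List (String × Int))) : Decidable (Spec_string_to_freq text out) := by
  unfold Spec_string_to_freq
  haveI h : DecidableEq (Int × List (Int × String) × List (String × Int) × List String × List (String × Int)) :=
    fun x y => instDecidableEqProd x y
  infer_instance

-- ===== CLAIM (what is proved, stated in full; the proofs are below) =====
def Claim_equal_string_to_freq : Prop := ∀ (text : String), Dom_string_to_freq text → Spec_string_to_freq text (string_to_freq text)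

-- ===== LEMMAS AND PROOFS =====

theorem pv_isspace_false (c : Char) (h1 : 33 ≤ c.toNat) (h2 : c.toNat ≤ 126) :
    PySem.Chars.isspace c = false := by
  unfold PySem.Chars.isspace
  simp only [Bool.or_eq_false_iff, Bool.and_eq_false_iff, decide_eq_false_iff_not]
  omega

-- lowerChar does not change whether a character is whitespace
theorem pv_isspace_lowerChar (c : Char) :
    PySem.Chars.isspace (PySem.Chars.lowerChar c) = PySem.Chars.isspace c := by
  unfold PySem.Chars.lowerChar
  split_ifs with h
  · unfold PySem.Chars.isupper at h
    simp only [Bool.and_eq_true, decide_eq_true_eq, Char.le_def] at h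
    obtain ⟨h1, h2⟩ := h
    rw [show ('A' : Char).val = 65 from rfl] at h1
    rw [show ('Z' : Char).val = 90 from rfl] at h2
    have hv1 : (65 : Nat) ≤ c.val.toNat := UInt32.le_iff_toNat_le.mp h1
    have hv2 : c.val.toNat ≤ 90 := UInt32.le_iff_toNat_le.mp h2
    have hc : c.toNat = c.val.toNat := rfl
    have hval : (c.toNat + 32).isValidChar := by left; omega
    have htn : (Char.ofNat (c.toNat + 32)).toNat = c.toNat + 32 := by
      rw [Char.toNat_ofNat, if_pos hval]
    rw [pv_isspace_false _ (by omega) (by omega), pv_isspace_false c (by omega) (by omega)]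
  · rfl

-- split₀.go on a word with no space characters just accumulates it into cur
theorem pv_go_word (w : List Char) (h : ∀ c ∈ w, PySem.Chars.isspace c = false)
    (s : List Char) (cur : List Char) (acc : List (List Char)) :
    PySem.Chars.split₀.go (w ++ s) cur acc = PySem.Chars.split₀.go s (w.reverse ++ cur) acc := by
  induction w generalizing cur with
  | nil => simp
  | cons c w ih =>
    rw [List.cons_append, PySem.Chars.split₀.go, h c (by simp)]
    simp only [Bool.false_eq_true, if_false]
    rw [ih (fun c hc => h c (by simp [hc])) (c :: cur)]
    simp

theorem pv_go_words (s : List Char) :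
    ∀ cur acc, (∀ w ∈ acc, w ≠ [] ∧ ∀ c ∈ w, PySem.Chars.isspace c = false) →
    (∀ c ∈ cur, PySem.Chars.isspace c = false) →
    ∀ w ∈ PySem.Chars.split₀.go s cur acc, w ≠ [] ∧ ∀ c ∈ w, PySem.Chars.isspace c = false := by
  induction s with
  | nil =>
    intro cur acc hacc hcur w hw
    rw [PySem.Chars.split₀.go] at hw
    split_ifs at hw with hc
    · exact hacc w (by simpa using hw)
    · simp only [List.mem_reverse, List.mem_cons] at hw
      rcases hw with h1 | h2
      · subst h1
        refine ⟨by simpa [List.isEmpty_iff] using hc, ?_⟩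
        intro c hc'; exact hcur c (by simpa using hc')
      · exact hacc w h2
  | cons c s ih =>
    intro cur acc hacc hcur w hw
    rw [PySem.Chars.split₀.go] at hw
    split_ifs at hw with h1 h2
    · exact ih [] acc hacc (by simp) w hw
    · refine ih [] _ ?_ (by simp) w hw
      intro v hv
      simp only [List.mem_cons] at hv
      rcases hv with h3 | h3
      · subst h3
        refine ⟨by simpa [List.isEmpty_iff] using h2, ?_⟩
        intro d hd; exact hcur d (by simpa using hd)
      · exact hacc v h3
    · refine ih (c :: cur) acc hacc ?_ w hw
      intro d hd
      simp only [List.mem_cons] at hd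
      rcases hd with h3 | h3
      · subst h3; simpa using h1
      · exact hcur d h3

-- every word of split₀ is nonempty and space-free
theorem pv_split₀_words (s : List Char) :
    ∀ w ∈ PySem.Chars.split₀ s, w ≠ [] ∧ ∀ c ∈ w, PySem.Chars.isspace c = false :=
  pv_go_words s [] [] (by simp) (by simp)

-- lower commutes with join on a single-space separator
theorem pv_lower_join (ws : List (List Char)) :
    PySem.Chars.lower (PySem.Chars.join [' '] ws) = PySem.Chars.join [' '] (ws.map PySem.Chars.lower) := by
  induction ws with
  | nil => simp [PySem.Chars.join_nil, PySem.Chars.lower]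
  | cons w t ih =>
    cases t with
    | nil => simp [PySem.Chars.join_singleton]
    | cons y t' =>
      rw [PySem.Chars.join_cons_cons, List.map_cons, List.map_cons, PySem.Chars.join_cons_cons,
        ← List.map_cons, ← ih]
      simp [PySem.Chars.lower]
      rfl

theorem pv_go_join (ws : List (List Char))
    (h : ∀ w ∈ ws, w ≠ [] ∧ ∀ c ∈ w, PySem.Chars.isspace c = false) :
    ∀ acc, PySem.Chars.split₀.go (PySem.Chars.join [' '] ws) [] acc = acc.reverse ++ ws := by
  induction ws with
  | nil => intro acc; rw [PySem.Chars.join_nil, PySem.Chars.split₀.go]; simp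
  | cons w t ih =>
    intro acc
    obtain ⟨hw, hwf⟩ := h w (by simp)
    cases t with
    | nil =>
      rw [PySem.Chars.join_singleton]
      have h' := pv_go_word w hwf [] [] acc
      rw [List.append_nil] at h'
      rw [h', PySem.Chars.split₀.go]
      rw [if_neg (by simp [List.isEmpty_iff, hw])]
      simp
    | cons y t' =>
      rw [PySem.Chars.join_cons_cons, List.append_assoc, pv_go_word w hwf _ [], List.append_nil]
      rw [show (([' '] ++ PySem.Chars.join [' '] (y :: t')) : List Char) = ' ' :: PySem.Chars.join [' '] (y :: t') from rfl]
      rw [PySem.Chars.split₀.go]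
      rw [if_pos (by decide)]
      rw [if_neg (by simp [List.isEmpty_iff, hw])]
      rw [ih (fun v hv => h v (by simp [hv])) (w.reverse.reverse :: acc)]
      simp

-- split₀ of a space-join of nonempty space-free words recovers the words
theorem pv_split₀_join (ws : List (List Char))
    (h : ∀ w ∈ ws, w ≠ [] ∧ ∀ c ∈ w, PySem.Chars.isspace c = false) :
    PySem.Chars.split₀ (PySem.Chars.join [' '] ws) = ws := by
  unfold PySem.Chars.split₀
  simpa using pv_go_join ws h []

-- a non-space char is in letters∪{' '} iff it is in letters
theorem pv_contains_space_letters (c : Char) (h : PySem.Chars.isspace c = false) :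
    PySem.Set.contains (PySem.Set.ofList (pvAsciiLetters ++ [' '])) c =
      PySem.Set.contains (PySem.Set.ofList pvAsciiLetters) c := by
  have hne : c ≠ ' ' := by
    intro he; subst he; exact absurd h (by decide)
  rw [Bool.eq_iff_iff, PySem.Set.contains_iff, PySem.Set.contains_iff,
    PySem.Set.mem_ofList, PySem.Set.mem_ofList]
  simp [hne]

-- A's re-split of the lowered, punctuation-stripped text is map-lower of the letters filter
theorem pv_wordlist0 (text : String) :
    process_string (strip_punct text) =
      ((PySem.Str.split₀ text).filter
        (fun w => w.toList.all (fun c => PySem.Set.contains (PySem.Set.ofList pvAsciiLetters) c))).map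
        PySem.Str.lower := by
  have hinj : Function.Injective (List.map String.toList) :=
    List.map_injective_iff.mpr (fun a b h => String.toList_inj.mp h)
  apply hinj
  unfold process_string strip_punct
  rw [PySem.Str.split₀_map_toList, PySem.Str.toList_lower, PySem.Str.toList_join]
  rw [show (" " : String).toList = [' '] from rfl]
  -- words of split₀ text are nonempty and space-free
  have hwords : ∀ w ∈ PySem.Str.split₀ text, w.toList ≠ [] ∧
      ∀ c ∈ w.toList, PySem.Chars.isspace c = false := by
    intro w hw
    exact pv_split₀_words text.toList w.toList
      (by rw [← PySem.Str.split₀_map_toList]; exact List.mem_map_of_mem hw)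
  -- the two letter filters agree on space-free words
  have hfilter : (PySem.Str.split₀ text).filter
        (fun w => w.toList.all (fun c => PySem.Set.contains (PySem.Set.ofList (pvAsciiLetters ++ [' '])) c)) =
      (PySem.Str.split₀ text).filter
        (fun w => w.toList.all (fun c => PySem.Set.contains (PySem.Set.ofList pvAsciiLetters) c)) := by
    apply List.filter_congr
    intro w hw
    rw [Bool.eq_iff_iff, List.all_eq_true, List.all_eq_true]
    constructor
    · intro hall c hc
      rw [← pv_contains_space_letters c ((hwords w hw).2 c hc)]
      exact hall c hc
    · intro hall c hc
      rw [pv_contains_space_letters c ((hwords w hw).2 c hc)]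
      exact hall c hc
  rw [hfilter]
  set flt := (PySem.Str.split₀ text).filter
      (fun w => w.toList.all (fun c => PySem.Set.contains (PySem.Set.ofList pvAsciiLetters) c)) with hflt
  have hmem : ∀ w ∈ flt, w ∈ PySem.Str.split₀ text := by
    intro w hw; rw [hflt] at hw; exact List.mem_of_mem_filter hw
  rw [show PySem.Chars.lower (PySem.Chars.join [' '] (flt.map String.toList)) =
      PySem.Chars.join [' '] ((flt.map String.toList).map PySem.Chars.lower) from pv_lower_join _]
  rw [pv_split₀_join]
  · simp only [List.map_map]
    apply List.map_congr_left
    intro w hw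
    simp [Function.comp, PySem.Str.toList_lower]
  · intro v hv
    simp only [List.map_map, List.mem_map] at hv
    obtain ⟨w, hw, hv'⟩ := hv
    obtain ⟨hne, hsf⟩ := hwords w (hmem w hw)
    subst hv'
    constructor
    · simp only [Function.comp, PySem.Chars.lower]
      simpa using hne
    · intro c hc
      simp only [Function.comp, PySem.Chars.lower, List.mem_map] at hc
      obtain ⟨c0, hc0, hc0'⟩ := hc
      subst hc0'
      rw [pv_isspace_lowerChar]
      exact hsf c0 hc0

-- the words B keeps, lowered (proof-side description of B's loop)
def pvKept (letters : PySem.Set Char) (l : List String) : List String :=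
  (l.filter (fun w => (w.toList.all (fun c => PySem.Set.contains letters c)) &&
      (PySem.Str.len (PySem.Str.lower w) != 1 ||
        (PySem.Str.lower w == "a" || PySem.Str.lower w == "i")))).map PySem.Str.lower

-- A's word list equals the fused description of B's
theorem pv_wordlist (text : String) :
    remove_single_char_elements (process_string (strip_punct text)) =
      pvKept (PySem.Set.ofList pvAsciiLetters) (PySem.Str.split₀ text) := by
  rw [show remove_single_char_elements (process_string (strip_punct text)) =
      List.filter (fun w => !(PySem.Str.len w == 1 && !(w == "a" || w == "i")))
        (process_string (strip_punct text)) from rfl]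
  rw [pv_wordlist0, List.filter_map, List.filter_filter]
  unfold pvKept
  apply congrArg (List.map PySem.Str.lower)
  apply List.filter_congr
  intro w _
  simp only [Function.comp]
  have hb : ∀ (a1 a2 p : Bool), (!(a1 && !a2) && p) = (p && (!a1 || a2)) := by decide
  simp only [bne]
  exact hb _ _ _

-- A's counting branch always inserts count+1
theorem pv_freq_step (d : PySem.Dict String Int) (w : String) :
    (if d.contains w then d.insert w (d.getD w 0 + 1) else d.insert w 1) =
      d.insert w (d.getD w 0 + 1) := by
  by_cases h : d.contains w
  · rw [if_pos h]
  · rw [if_neg h]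
    have : d.getD w 0 = 0 := by
      unfold PySem.Dict.getD
      rw [(PySem.Dict.get?_eq_none_iff_contains d w).mpr (by simpa using h)]
      rfl
    rw [this]
    norm_num

theorem pv_wordfreq (wl : List String) :
    word_frequency wl = wl.foldl (fun d w => d.insert w (d.getD w 0 + 1)) PySem.Dict.empty := by
  unfold word_frequency
  congr 1
  funext d w
  exact pv_freq_step d w

-- B's fused loop splits into the word list and the counting fold over it
theorem pv_foldB (letters : PySem.Set Char) (l : List String) (wl : List String)
    (d : PySem.Dict String Int) :
    l.foldl (pvStepB letters) (wl, d) =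
      (wl ++ pvKept letters l, (pvKept letters l).foldl (fun d w => d.insert w (d.getD w 0 + 1)) d) := by
  induction l generalizing wl d with
  | nil => simp [pvKept]
  | cons a t ih =>
    rw [List.foldl_cons]
    by_cases h1 : (a.toList.all (fun c => PySem.Set.contains letters c)) = true
    · by_cases h2 : (PySem.Str.len (PySem.Str.lower a) != 1 ||
          (PySem.Str.lower a == "a" || PySem.Str.lower a == "i")) = true
      · have hstep : pvStepB letters (wl, d) a =
            (wl ++ [PySem.Str.lower a],
              d.insert (PySem.Str.lower a) (d.getD (PySem.Str.lower a) 0 + 1)) := by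
          unfold pvStepB
          rw [if_pos h1, if_pos h2]
        rw [hstep, ih]
        unfold pvKept
        rw [List.filter_cons_of_pos (by rw [Bool.and_eq_true]; exact ⟨h1, h2⟩)]
        simp
      · have hstep : pvStepB letters (wl, d) a = (wl, d) := by
          unfold pvStepB
          rw [if_pos h1, if_neg h2]
        rw [hstep, ih]
        unfold pvKept
        rw [List.filter_cons_of_neg (by simp only [Bool.and_eq_true]; tauto)]
    · have hstep : pvStepB letters (wl, d) a = (wl, d) := by
        unfold pvStepB
        rw [if_neg h1]
      rw [hstep, ih]
      unfold pvKept
      rw [List.filter_cons_of_neg (by simp only [Bool.and_eq_true]; tauto)]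

-- every lowercased letter of a kept word is an ascii letter
set_option maxRecDepth 8192 in
theorem pv_lowerChar_letter :
    pvAsciiLetters.all (fun c => decide (PySem.Chars.lowerChar c ∈ pvAsciiLetters)) = true := by
  decide

theorem pv_kept_letters (letters : PySem.Set Char) (hl : letters = PySem.Set.ofList pvAsciiLetters)
    (l : List String) :
    ∀ w ∈ pvKept letters l,
      w.toList.all (fun c => PySem.Set.contains letters c) = true := by
  intro w hw
  unfold pvKept at hw
  simp only [List.mem_map] at hw
  obtain ⟨w0, hw0f, hw0⟩ := hw
  rw [List.mem_filter, Bool.and_eq_true] at hw0f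
  have ha := hw0f.2.1
  subst hw0
  rw [List.all_eq_true] at ha ⊢
  intro c hc
  rw [PySem.Str.toList_lower] at hc
  unfold PySem.Chars.lower at hc
  simp only [List.mem_map] at hc
  obtain ⟨c0, hc0, hc0'⟩ := hc
  subst hc0'
  have h0 := ha c0 hc0
  rw [hl, PySem.Set.contains_iff, PySem.Set.mem_ofList] at h0 ⊢
  have := List.all_eq_true.mp pv_lowerChar_letter c0 h0
  simpa using this

-- the letter-filter over freq's items is a no-op and re-inserting rebuilds the same dict
theorem pv_freq_rebuild (wl : List String)
    (hw : ∀ w ∈ wl, w.toList.all (fun c => PySem.Set.contains (PySem.Set.ofList pvAsciiLetters) c) = true) :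
    (((wl.foldl (fun d w => d.insert w (d.getD w 0 + 1)) (PySem.Dict.empty : PySem.Dict String Int)).items.filter
        (fun p => p.1.toList.all (fun c => PySem.Set.contains (PySem.Set.ofList pvAsciiLetters) c))).foldl
      (fun d p => d.insert p.1 p.2) PySem.Dict.empty) =
      wl.foldl (fun d w => d.insert w (d.getD w 0 + 1)) (PySem.Dict.empty : PySem.Dict String Int) := by
  set freq0 := wl.foldl (fun d w => d.insert w (d.getD w 0 + 1)) (PySem.Dict.empty : PySem.Dict String Int) with hfreq0
  have hkeys : freq0.keys = PySem.Set.ofList wl := by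
    rw [hfreq0, PySem.Dict.keys_foldl_insert wl (fun d x => d.getD x 0 + 1) PySem.Dict.empty]
    rw [show (PySem.Dict.empty : PySem.Dict String Int).keys = [] from rfl]
    exact PySem.Set.update_nil_left wl
  have hkmem : ∀ p ∈ freq0.items, p.1 ∈ wl := by
    intro p hp
    have := PySem.Dict.mem_keys_of_mem_items freq0 hp
    rw [hkeys, PySem.Set.mem_ofList] at this
    exact this
  have hnodup : (freq0.items.map Prod.fst).Nodup := by
    have : freq0.items.map Prod.fst = freq0.keys := rfl
    rw [this, hkeys]
    exact PySem.Set.nodup_ofList wl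
  rw [List.filter_eq_self.mpr (fun p hp => hw p.1 (hkmem p hp))]
  apply PySem.Dict.ext
  rw [PySem.Dict.items_foldl_insert_fresh freq0.items Prod.fst Prod.snd PySem.Dict.empty
    (fun a _ => PySem.Dict.contains_empty a.1) hnodup]
  rw [show (PySem.Dict.empty : PySem.Dict String Int).items = [] from rfl]
  simp

-- ===== VERDICT (by name: the statement is the Claim_ definition above) =====
theorem string_to_freq_spec : Claim_equal_string_to_freq := by
  intro text _
  unfold Spec_string_to_freq string_to_freq string_to_freq_alt
  dsimp only
  rw [pv_foldB (PySem.Set.ofList pvAsciiLetters) (PySem.Str.split₀ text) [] PySem.Dict.empty]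
  dsimp only
  rw [List.nil_append]
  rw [pv_wordlist text, pv_wordfreq]
  rw [pv_freq_rebuild _ (pv_kept_letters _ rfl _)]
  simp [PySem.Dict.keys, PySem.Dict.size]
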